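-- pv_equiv track=rewrite | github.com/freddiecorleone/crossword_navigation | src/training_app/crossword_collector_app.py | count_remaining_correct
-- ===== SOURCE A (Python) =====
-- def count_remaining_correct(guess_norm: str, answer_norm: str, filled_idxs: list) -> int:
--     # Count correctly filled letters by the user among the *unfilled* positions we showed
--     # Only compare positions < min(len(guess), len(answer)) to be robust to length mismatch
--     n = min(len(guess_norm), len(answer_norm))
--     correct = 0
--     for i in range(n):
--         if i in filled_idxs:
--             continue
--         if guess_norm[i] == answer_norm[i]:
--             correct += 1
--     return correct
-- ===== SOURCE B (Python) =====
-- def count_remaining_correct(guess_norm: str, answer_norm: str, filled_idxs: list) -> int: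
--     # Count ALL matching positions in one pass, then subtract the revealed ones.
--     n = min(len(guess_norm), len(answer_norm))
--     total = sum(1 for i in range(n) if guess_norm[i] == answer_norm[i])
--     for i in set(filled_idxs):
--         if 0 <= i < n and guess_norm[i] == answer_norm[i]:
--             total -= 1
--     return total
-- ===== Notes on version B (the rewrite author's own statement) =====
-- stated objective: faster
-- what changed: Replaces A's skip-during-scan loop (with an O(m) membership test per position) by a count-all-matches pass followed by a corrective pass over the deduplicated filled indices that subtracts revealed matches.
import Mathlib
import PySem

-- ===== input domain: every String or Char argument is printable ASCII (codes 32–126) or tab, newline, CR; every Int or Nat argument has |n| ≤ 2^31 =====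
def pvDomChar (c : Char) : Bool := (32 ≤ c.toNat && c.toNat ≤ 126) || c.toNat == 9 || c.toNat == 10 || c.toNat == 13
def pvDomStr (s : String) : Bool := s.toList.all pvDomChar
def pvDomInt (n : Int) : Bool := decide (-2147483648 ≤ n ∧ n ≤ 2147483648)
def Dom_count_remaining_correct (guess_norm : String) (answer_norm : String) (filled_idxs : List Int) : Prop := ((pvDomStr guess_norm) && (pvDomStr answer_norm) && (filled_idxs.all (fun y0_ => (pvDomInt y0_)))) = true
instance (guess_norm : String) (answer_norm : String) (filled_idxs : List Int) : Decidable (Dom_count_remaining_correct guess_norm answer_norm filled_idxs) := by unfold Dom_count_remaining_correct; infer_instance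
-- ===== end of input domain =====

-- B replaces A's skip-during-scan loop by a count-all-matches pass plus a corrective
-- subtraction pass over the deduplicated filled indices (alternative decomposition).

-- ===== PORT A =====
-- for i in range(n): if i in filled_idxs: continue; if guess_norm[i] == answer_norm[i]: correct += 1
def count_remaining_correct (guess_norm : String) (answer_norm : String) (filled_idxs : List Int) : Int :=
  let n := min guess_norm.toList.length answer_norm.toList.length
  (List.range n).foldl (fun correct (i : Nat) =>
    if filled_idxs.contains (i : Int) then correct
    else if guess_norm.toList[i]? = answer_norm.toList[i]? then correct + 1 else correct) 0

-- ===== PORT B =====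
-- total = sum over range n of matches; then for i in set(filled_idxs): subtract revealed matches
def count_remaining_correct_alt (guess_norm : String) (answer_norm : String) (filled_idxs : List Int) : Int :=
  let n := min guess_norm.toList.length answer_norm.toList.length
  let total : Int := (List.range n).foldl (fun acc (i : Nat) =>
    if guess_norm.toList[i]? = answer_norm.toList[i]? then acc + 1 else acc) 0
  (PySem.Set.ofList filled_idxs).foldl (fun acc i =>
    if 0 ≤ i ∧ i < (n : Int) ∧ guess_norm.toList[i.toNat]? = answer_norm.toList[i.toNat]? then acc - 1 else acc) total

-- ===== PRECONDITION & SPEC =====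
def Spec_count_remaining_correct (guess_norm : String) (answer_norm : String) (filled_idxs : List Int) (out : Int) : Prop := out = count_remaining_correct_alt guess_norm answer_norm filled_idxs
instance (guess_norm : String) (answer_norm : String) (filled_idxs : List Int) (out : Int) : Decidable (Spec_count_remaining_correct guess_norm answer_norm filled_idxs out) := by unfold Spec_count_remaining_correct; infer_instance

-- ===== CLAIM (what is proved, stated in full; the proofs are below) =====
def Claim_equal_count_remaining_correct : Prop := ∀ (guess_norm : String) (answer_norm : String) (filled_idxs : List Int), Dom_count_remaining_correct guess_norm answer_norm filled_idxs → Spec_count_remaining_correct guess_norm answer_norm filled_idxs (count_remaining_correct guess_norm answer_norm filled_idxs)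

-- ===== LEMMAS AND PROOFS =====

-- A's loop: accumulator form, skip-during-scan body turned into one count
lemma pvFoldA_eq_count (gl al : List Char) (filled : List Int) (l : List Nat) (s : Int) :
    l.foldl (fun correct (i : Nat) =>
      if filled.contains (i : Int) then correct
      else if gl[i]? = al[i]? then correct + 1 else correct) s
    = s + (l.countP (fun (i : Nat) => !decide ((i : Int) ∈ filled) && (gl[i]? == al[i]?)) : Int) := by
  induction l generalizing s with
  | nil => simp
  | cons x xs ih =>
    simp only [List.foldl_cons, List.countP_cons, ih]
    by_cases hc : (x : Int) ∈ filled <;> by_cases hm : gl[x]? = al[x]? <;>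
      simp [hc, hm] <;> omega

-- B's first pass: accumulator form of the all-matches count
lemma pvFoldB_count (gl al : List Char) (l : List Nat) (s : Int) :
    l.foldl (fun acc (i : Nat) => if gl[i]? = al[i]? then acc + 1 else acc) s
    = s + (l.countP (fun (i : Nat) => gl[i]? == al[i]?) : Int) := by
  induction l generalizing s with
  | nil => simp
  | cons x xs ih =>
    simp only [List.foldl_cons, List.countP_cons, ih]
    by_cases hm : gl[x]? = al[x]? <;> simp [hm] <;> omega

-- B's second pass: accumulator form of the subtraction
lemma pvFoldB_sub (gl al : List Char) (n : Nat) (l : List Int) (s : Int) :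
    l.foldl (fun acc i =>
      if 0 ≤ i ∧ i < (n : Int) ∧ gl[i.toNat]? = al[i.toNat]? then acc - 1 else acc) s
    = s - (l.countP (fun i => decide (0 ≤ i) && decide (i < (n : Int)) && (gl[i.toNat]? == al[i.toNat]?)) : Int) := by
  induction l generalizing s with
  | nil => simp
  | cons x xs ih =>
    simp only [List.foldl_cons, List.countP_cons, ih]
    by_cases h1 : 0 ≤ x <;> by_cases h2 : x < (n : Int) <;> by_cases h3 : gl[x.toNat]? = al[x.toNat]? <;>
      simp [h1, h2, h3] <;> omega

-- split the all-matches count by membership in filled_idxs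
lemma pvCount_split (gl al : List Char) (filled : List Int) (n : Nat) :
    (List.range n).countP (fun (i : Nat) => gl[i]? == al[i]?)
    = (List.range n).countP (fun (i : Nat) => !decide ((i : Int) ∈ filled) && (gl[i]? == al[i]?))
      + (List.range n).countP (fun (i : Nat) => decide ((i : Int) ∈ filled) && (gl[i]? == al[i]?)) := by
  induction (List.range n) with
  | nil => simp
  | cons x xs ih =>
    simp only [List.countP_cons]
    by_cases hc : (x : Int) ∈ filled <;> by_cases hm : gl[x]? = al[x]? <;>
      simp [hc, hm, ih] <;> omega

-- the corrective pass over set(filled_idxs) counts exactly the in-range revealed matches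
lemma pvCount_set_eq (gl al : List Char) (filled : List Int) (n : Nat) :
    (PySem.Set.ofList filled).countP
        (fun i => decide (0 ≤ i) && decide (i < (n : Int)) && (gl[i.toNat]? == al[i.toNat]?))
    = (List.range n).countP (fun (i : Nat) => decide ((i : Int) ∈ filled) && (gl[i]? == al[i]?)) := by
  rw [List.countP_eq_length_filter, List.countP_eq_length_filter]
  have hperm : List.Perm
      (((PySem.Set.ofList filled).filter
          (fun i => decide (0 ≤ i) && decide (i < (n : Int)) && (gl[i.toNat]? == al[i.toNat]?))).map Int.toNat)
      ((List.range n).filter (fun (i : Nat) => decide ((i : Int) ∈ filled) && (gl[i]? == al[i]?))) := by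
    apply (List.perm_ext_iff_of_nodup ?_ ?_).2
    · intro x
      simp only [List.mem_map, List.mem_filter, PySem.Set.mem_ofList, List.mem_range,
        Bool.and_eq_true, decide_eq_true_eq, beq_iff_eq]
      constructor
      · rintro ⟨j, ⟨hj, ⟨⟨h0, hn⟩, hm⟩⟩, rfl⟩
        refine ⟨by omega, ?_, ?_⟩
        · have hjx : (j.toNat : Int) = j := by omega
          simpa [hjx] using hj
        · exact hm
      · rintro ⟨hx, hmem, hm⟩
        exact ⟨(x : Int), ⟨hmem, ⟨⟨by omega, by omega⟩, by simpa using hm⟩⟩, by simp⟩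
    · apply List.Nodup.map_on
      · intro j hj k hk hjk
        have hj0 : 0 ≤ j := by
          simp only [List.mem_filter, Bool.and_eq_true, decide_eq_true_eq] at hj; exact hj.2.1.1
        have hk0 : 0 ≤ k := by
          simp only [List.mem_filter, Bool.and_eq_true, decide_eq_true_eq] at hk; exact hk.2.1.1
        omega
      · exact (PySem.Set.nodup_ofList filled).filter _
    · exact (List.nodup_range).filter _
  have h1 := hperm.length_eq
  simpa using h1

-- ===== VERDICT (by name: the statement is the Claim_ definition above) =====
theorem count_remaining_correct_spec : Claim_equal_count_remaining_correct := by
  intro g a filled _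
  show count_remaining_correct g a filled = count_remaining_correct_alt g a filled
  unfold count_remaining_correct count_remaining_correct_alt
  dsimp only
  rw [pvFoldA_eq_count, pvFoldB_count, pvFoldB_sub, pvCount_set_eq,
    pvCount_split g.toList a.toList filled]
  push_cast
  ring
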